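-- pv_equiv track=rewrite | github.com/adcosta17/somrit-test | scripts/get_mouse_metrics.py | get_nearby
-- ===== SOURCE A (Python) =====
-- def get_nearby(chrom, start, end, seen):
--     i = start
--     count = 0
--     nearby = {}
--     if chrom not in seen:
--         return nearby
--     while i < end:
--         if i in seen[chrom]:
--             nearby[i] = seen[chrom][i]
--             count += 1
--         i += 1
--     return nearby
-- ===== SOURCE B (Python) =====
-- def get_nearby(chrom, start, end, seen):
--     if chrom not in seen:
--         return {}
--     return dict(sorted((k, v) for k, v in seen[chrom].items() if start <= k < end))
-- ===== Notes on version B (the rewrite author's own statement) =====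
-- stated objective: alternative
-- what changed: Instead of scanning every integer position i in [start,end) and probing the dict, B filters the existing items of seen[chrom] to the range and sorts them by key, so the cost depends on the dict size rather than on end-start.
import Mathlib
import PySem

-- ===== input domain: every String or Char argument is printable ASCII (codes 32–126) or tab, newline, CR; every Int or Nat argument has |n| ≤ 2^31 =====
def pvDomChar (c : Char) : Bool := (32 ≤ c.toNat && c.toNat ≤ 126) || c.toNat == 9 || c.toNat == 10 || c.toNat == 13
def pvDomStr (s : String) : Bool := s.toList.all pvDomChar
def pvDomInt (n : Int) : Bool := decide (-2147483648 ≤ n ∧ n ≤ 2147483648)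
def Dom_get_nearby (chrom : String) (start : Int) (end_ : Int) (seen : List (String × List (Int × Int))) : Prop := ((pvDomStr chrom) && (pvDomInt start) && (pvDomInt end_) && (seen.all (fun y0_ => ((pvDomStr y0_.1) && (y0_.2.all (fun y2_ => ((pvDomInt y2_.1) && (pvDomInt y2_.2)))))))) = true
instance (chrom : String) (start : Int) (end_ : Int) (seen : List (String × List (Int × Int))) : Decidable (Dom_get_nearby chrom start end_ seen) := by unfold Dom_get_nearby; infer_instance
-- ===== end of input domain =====

-- B filters the items of seen[chrom] to keys in [start,end) and sorts them by key, instead of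
-- probing every integer position in the range (alternative: cost driven by the dict size, not end-start).


-- ===== PORT A =====
-- the 'while i < end' loop: i steps by 1, count mirrors Python's (dead) counter, nearby is the result dict
def pvLoopA (d : PySem.Dict Int Int) (end_ : Int) (i : Int) (count : Int) (nearby : PySem.Dict Int Int) : PySem.Dict Int Int :=
  if _h : i < end_ then
    match d.get? i with
    | some v => pvLoopA d end_ (i + 1) (count + 1) (nearby.insert i v)
    | none => pvLoopA d end_ (i + 1) count nearby
  else nearby
termination_by (end_ - i).toNat
decreasing_by all_goals omega

def get_nearby (chrom : String) (start : Int) (end_ : Int) (seen : List (String × List (Int × Int))) : List (Int × Int) :=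
  match (PySem.Dict.mk seen).get? chrom with
  | none => ([] : List (Int × Int))
  | some inner => (pvLoopA (PySem.Dict.mk inner) end_ start 0 PySem.Dict.empty).items

-- ===== PORT B =====
def get_nearby_alt (chrom : String) (start : Int) (end_ : Int) (seen : List (String × List (Int × Int))) : List (Int × Int) :=
  match (PySem.Dict.mk seen).get? chrom with
  | none => ([] : List (Int × Int))
  | some inner =>
      PySem.List.sorted
        ((PySem.Dict.mk inner).items.filter (fun p => decide (start ≤ p.1 ∧ p.1 < end_)))
        (fun p => p.1) false

-- ===== PRECONDITION & SPEC =====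
-- Pre_ excludes association lists whose inner key lists carry duplicate keys: a Python dict cannot
-- hold duplicate keys, so such lists encode no Python input and A's/B's values there are artefacts
-- of the encoding.
def Pre_get_nearby (chrom : String) (start : Int) (end_ : Int) (seen : List (String × List (Int × Int))) : Prop :=
  ∀ p ∈ seen, (p.2.map Prod.fst).Nodup
instance (chrom : String) (start : Int) (end_ : Int) (seen : List (String × List (Int × Int))) : Decidable (Pre_get_nearby chrom start end_ seen) := by unfold Pre_get_nearby; infer_instance

def pvWitness_get_nearby : String × Int × Int × (List (String × List (Int × Int))) :=
  ("c1", 0, 3, [("c1", [(1, 5), (10, 7)])])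

def Spec_get_nearby (chrom : String) (start : Int) (end_ : Int) (seen : List (String × List (Int × Int))) (out : List (Int × Int)) : Prop := out = get_nearby_alt chrom start end_ seen
instance (chrom : String) (start : Int) (end_ : Int) (seen : List (String × List (Int × Int))) (out : List (Int × Int)) : Decidable (Spec_get_nearby chrom start end_ seen out) := by unfold Spec_get_nearby; infer_instance

-- ===== CLAIM (what is proved, stated in full; the proofs are below) =====
def Claim_equal_get_nearby : Prop := ∀ (chrom : String) (start : Int) (end_ : Int) (seen : List (String × List (Int × Int))), Dom_get_nearby chrom start end_ seen → Pre_get_nearby chrom start end_ seen → Spec_get_nearby chrom start end_ seen (get_nearby chrom start end_ seen)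

-- ===== LEMMAS AND PROOFS =====

-- the pairs A's scan collects between i and end_
def pvCollect (d : PySem.Dict Int Int) (i end_ : Int) : List (Int × Int) :=
  (PySem.List.pyRange i end_ 1).filterMap (fun j => (d.get? j).map (fun v => (j, v)))

theorem pvCollect_nil (d : PySem.Dict Int Int) (i end_ : Int) (h : ¬ i < end_) :
    pvCollect d i end_ = [] := by
  have hr : PySem.List.pyRange i end_ 1 = [] := by
    rcases hx : PySem.List.pyRange i end_ 1 with _ | ⟨a, t⟩
    · rfl
    · exfalso
      have ha : a ∈ PySem.List.pyRange i end_ 1 := by rw [hx]; exact List.mem_cons_self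
      rw [PySem.List.mem_pyRange_one] at ha; omega
  simp [pvCollect, hr]

theorem pvCollect_cons (d : PySem.Dict Int Int) (i end_ : Int) (h : i < end_) :
    pvCollect d i end_ =
      ((d.get? i).map (fun v => (i, v))).toList ++ pvCollect d (i + 1) end_ := by
  unfold pvCollect
  rw [PySem.List.pyRange_one_cons h, List.filterMap_cons]
  cases d.get? i <;> simp

theorem pvLoopA_items (d : PySem.Dict Int Int) (end_ i count : Int) (nearby : PySem.Dict Int Int)
    (h : ∀ k ∈ nearby.keys, k < i) :
    (pvLoopA d end_ i count nearby).items = nearby.items ++ pvCollect d i end_ := by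
  revert h
  fun_induction pvLoopA d end_ i count nearby with
  | case1 i count nearby hlt v hv ih =>
      intro h
      have h' : ∀ k ∈ (nearby.insert i v).keys, k < i + 1 := by
        intro k hk
        rcases (PySem.Dict.mem_keys_insert nearby i k v).mp hk with rfl | hk'
        · omega
        · have := h k hk'; omega
      rw [ih h']
      have hni : nearby.contains i = false := by
        by_contra hc
        have hmem : i ∈ nearby.keys :=
          (PySem.Dict.contains_iff_mem_keys nearby i).mp (by revert hc; cases nearby.contains i <;> simp)
        have := h i hmem; omega
      rw [PySem.Dict.items_insert_of_not_contains nearby v hni]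
      rw [pvCollect_cons d i end_ hlt, hv]
      simp
  | case2 i count nearby hlt hv ih =>
      intro h
      rw [ih (fun k hk => by have := h k hk; omega)]
      rw [pvCollect_cons d i end_ hlt, hv]
      simp
  | case3 i count nearby hlt =>
      intro h
      rw [pvCollect_nil d i end_ hlt]
      simp

theorem pvCollect_pairwise (d : PySem.Dict Int Int) (i end_ : Int) :
    (pvCollect d i end_).Pairwise (fun a b => a.1 < b.1) := by
  unfold pvCollect
  rw [List.pairwise_filterMap]
  refine (PySem.List.pairwise_lt_pyRange_one i end_).imp ?_
  intro a b hab p hp q hq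
  cases ha : d.get? a <;> cases hb : d.get? b <;> simp [ha, hb] at hp hq
  subst hp; subst hq; simpa using hab

theorem pvCollect_mem (d : PySem.Dict Int Int) (i end_ : Int) (p : Int × Int)
    (hnd : d.keys.Nodup) :
    p ∈ pvCollect d i end_ ↔ p ∈ d.items ∧ (i ≤ p.1 ∧ p.1 < end_) := by
  obtain ⟨k, v⟩ := p
  simp only [pvCollect, List.mem_filterMap, PySem.List.mem_pyRange_one]
  constructor
  · rintro ⟨j, hj, hf⟩
    cases hg : d.get? j with
    | none => simp [hg] at hf
    | some w =>
        simp [hg] at hf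
        obtain ⟨rfl, rfl⟩ := hf
        exact ⟨(PySem.Dict.get?_eq_some_iff_mem_items d j w hnd).mp hg, hj⟩
  · rintro ⟨hmem, hk⟩
    refine ⟨k, hk, ?_⟩
    simp [(PySem.Dict.get?_eq_some_iff_mem_items d k v hnd).mpr hmem]

theorem pvCollect_perm (d : PySem.Dict Int Int) (i end_ : Int) (hnd : d.keys.Nodup) :
    (pvCollect d i end_).Perm (d.items.filter (fun p => decide (i ≤ p.1 ∧ p.1 < end_))) := by
  have nd1 : (pvCollect d i end_).Nodup :=
    (pvCollect_pairwise d i end_).imp (fun h => by intro he; rw [he] at h; omega)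
  have nd2 : (d.items.filter (fun p => decide (i ≤ p.1 ∧ p.1 < end_))).Nodup :=
    List.Nodup.filter _ (List.Nodup.of_map Prod.fst hnd)
  refine (List.perm_ext_iff_of_nodup nd1 nd2).mpr ?_
  intro p
  rw [pvCollect_mem d i end_ p hnd, List.mem_filter]
  simp

-- ===== VERDICT (by name: the statement is the Claim_ definition above) =====
theorem get_nearby_spec : Claim_equal_get_nearby := by
  intro chrom start end_ seen _dom hpre
  unfold Spec_get_nearby get_nearby get_nearby_alt
  cases hget : (PySem.Dict.mk seen).get? chrom with
  | none => rfl
  | some inner =>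
      have hmem : (chrom, inner) ∈ (PySem.Dict.mk seen).items :=
        PySem.Dict.mem_items_of_get?_eq_some _ hget
      have hnd : (PySem.Dict.mk inner).keys.Nodup := by
        have := hpre (chrom, inner) hmem
        simpa [PySem.Dict.keys] using this
      dsimp only
      rw [pvLoopA_items _ _ _ _ _ (by simp [PySem.Dict.keys, PySem.Dict.empty])]
      rw [PySem.List.sorted_eq_of_perm_of_pairwise_lt
        (inner.filter (fun p => decide (start ≤ p.1 ∧ p.1 < end_)))
        (pvCollect (PySem.Dict.mk inner) start end_) (fun p => p.1)
        (pvCollect_perm _ _ _ hnd) (pvCollect_pairwise _ _ _)]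
      simp [PySem.Dict.empty]
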